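-- pv_equiv track=rewrite | github.com/marinasi/DiplomaThesis | MCLNN_Functional_API_relu.py | find_neuros_for_lambda_function
-- ===== SOURCE A (Python) =====
-- def find_neuros_for_lambda_function(matrix, rows, columns):
-- 	temp_list=[]
-- 	for i in range(columns):
-- 		temp_list.append(i)
--
-- 	dict_for_neurons={}
-- 	for i in temp_list:
-- 		dict_for_neurons[i] = None
--
-- 	for j in range(columns):
-- 		list_for_neurons=[]
-- 		for i in range(rows):
-- 			if matrix[i][j]==1:
-- 				list_for_neurons.append(i)
--
-- 		dict_for_neurons[j]=list_for_neurons
--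
-- 	return dict_for_neurons
-- ===== SOURCE B (Python) =====
-- def find_neuros_for_lambda_function(matrix, rows, columns):
-- 	# sparse COO representation: one flat list of (column, row) pairs for the 1-entries
-- 	coords = [(j, i) for i, row in enumerate(matrix[:max(rows, 0)]) for j in range(columns) if row[j] == 1]
-- 	# lexicographic sort groups the pairs by column (rows ascending inside each group)
-- 	coords.sort()
-- 	dict_for_neurons = {j: [] for j in range(columns)}
-- 	for j, i in coords:
-- 		dict_for_neurons[j].append(i)
-- 	return dict_for_neurons
-- ===== Notes on version B (the rewrite author's own statement) =====
-- stated objective: alternative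
-- what changed: B builds a sparse coordinate list of (column,row) pairs for the 1-entries, sorts it lexicographically, and scatters it into a pre-seeded {column: []} dict in one flat pass, instead of A's None pre-pass plus dense column-major rebuild of one list per column.
import Mathlib
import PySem

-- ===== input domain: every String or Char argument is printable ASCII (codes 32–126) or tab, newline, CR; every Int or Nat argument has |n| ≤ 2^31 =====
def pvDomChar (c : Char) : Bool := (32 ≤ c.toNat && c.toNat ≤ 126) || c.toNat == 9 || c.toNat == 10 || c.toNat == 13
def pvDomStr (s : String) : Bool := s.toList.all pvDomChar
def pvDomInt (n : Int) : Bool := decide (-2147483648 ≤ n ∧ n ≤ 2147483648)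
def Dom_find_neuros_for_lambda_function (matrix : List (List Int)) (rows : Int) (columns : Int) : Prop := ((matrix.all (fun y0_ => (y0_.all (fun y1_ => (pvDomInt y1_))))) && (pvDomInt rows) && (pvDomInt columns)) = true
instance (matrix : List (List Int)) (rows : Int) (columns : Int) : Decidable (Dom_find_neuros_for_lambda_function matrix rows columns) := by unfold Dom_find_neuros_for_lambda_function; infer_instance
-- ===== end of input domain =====

-- B replaces A's dense column-major rebuild (None pre-pass, then per column a full row scan)
-- by a sparse-coordinate algorithm: one flat COO list of (column, row) pairs for the 1-entries,
-- sorted lexicographically, then scattered into a pre-seeded {column: []} dict (alternative; same return value, proved below).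

-- ===== PORT A =====
def find_neuros_for_lambda_function (matrix : List (List Int)) (rows : Int) (columns : Int) : List (Int × List Int) :=
  -- temp_list=[]; for i in range(columns): temp_list.append(i)
  let temp_list : List Int := (PySem.List.pyRange 0 columns 1).foldl (fun acc i => acc ++ [i]) []
  -- dict_for_neurons={}; for i in temp_list: dict_for_neurons[i] = None
  -- (the dict holds None first and lists later, so its value type is Option (List Int))
  let d1 : PySem.Dict Int (Option (List Int)) :=
    temp_list.foldl (fun d i => d.insert i none) PySem.Dict.empty
  -- for j in range(columns): list_for_neurons=[]; for i in range(rows): if matrix[i][j]==1: append i; dict[j]=list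
  let d2 : PySem.Dict Int (Option (List Int)) :=
    (PySem.List.pyRange 0 columns 1).foldl (fun d j =>
      d.insert j (some ((PySem.List.pyRange 0 rows 1).foldl (fun l i =>
        if (PySem.List.pyGet? ((PySem.List.pyGet? matrix i).getD []) j).getD 0 == 1 then l ++ [i] else l) []))) d1
  -- return dict_for_neurons: at this point every value is some _; unwrap to the convention type
  d2.items.map (fun kv => (kv.1, kv.2.getD []))

-- ===== PORT B =====
def find_neuros_for_lambda_function_alt (matrix : List (List Int)) (rows : Int) (columns : Int) : List (Int × List Int) :=
  -- coords = [(j, i) for i, row in enumerate(matrix[:max(rows, 0)]) for j in range(columns) if row[j] == 1]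
  -- (row[j] is ported with pyGet?/getD; exact wherever the Python comprehension raises no IndexError)
  let coords : List (Int × Int) :=
    (PySem.List.enumerate (PySem.List.slice matrix none (some (max rows 0)))).flatMap (fun p =>
      ((PySem.List.pyRange 0 columns 1).filter (fun j =>
        (PySem.List.pyGet? p.2 j).getD 0 == 1)).map (fun j => (j, p.1)))
  -- coords.sort()  (in-place lexicographic tuple sort of the local list)
  let sortedCoords := PySem.List.sorted2 coords (fun p => p.1) (fun p => p.2)
  -- dict_for_neurons = {j: [] for j in range(columns)}
  let d0 : PySem.Dict Int (List Int) :=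
    (PySem.List.pyRange 0 columns 1).foldl (fun d j => d.insert j []) PySem.Dict.empty
  -- for j, i in coords: dict_for_neurons[j].append(i)
  -- (every first component is a key of d0, so Dict.modify with default [] is exact here)
  let d : PySem.Dict Int (List Int) :=
    sortedCoords.foldl (fun d p => d.modify p.1 [] (fun l => l ++ [p.2])) d0
  d.items

-- ===== PRECONDITION & SPEC =====
-- Pre_ excludes exactly the inputs on which the Python A raises IndexError:
-- with rows > 0 and columns > 0, A reads matrix[i][j] for all i < rows, j < columns.
def Pre_find_neuros_for_lambda_function (matrix : List (List Int)) (rows : Int) (columns : Int) : Prop :=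
  rows ≤ 0 ∨ columns ≤ 0 ∨ (rows ≤ matrix.length ∧ ∀ r ∈ matrix.take rows.toNat, columns ≤ r.length)
instance (matrix : List (List Int)) (rows : Int) (columns : Int) : Decidable (Pre_find_neuros_for_lambda_function matrix rows columns) := by unfold Pre_find_neuros_for_lambda_function; infer_instance
def pvWitness_find_neuros_for_lambda_function : List (List Int) × Int × Int := ([[1, 0], [0, 1], [1, 1]], 3, 2)

def Spec_find_neuros_for_lambda_function (matrix : List (List Int)) (rows : Int) (columns : Int) (out : List (Int × List Int)) : Prop := out = find_neuros_for_lambda_function_alt matrix rows columns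
instance (matrix : List (List Int)) (rows : Int) (columns : Int) (out : List (Int × List Int)) : Decidable (Spec_find_neuros_for_lambda_function matrix rows columns out) := by unfold Spec_find_neuros_for_lambda_function; infer_instance

-- ===== CLAIM (what is proved, stated in full; the proofs are below) =====
def Claim_equal_find_neuros_for_lambda_function : Prop := ∀ (matrix : List (List Int)) (rows : Int) (columns : Int), Dom_find_neuros_for_lambda_function matrix rows columns → Pre_find_neuros_for_lambda_function matrix rows columns → Spec_find_neuros_for_lambda_function matrix rows columns (find_neuros_for_lambda_function matrix rows columns)

-- ===== LEMMAS AND PROOFS =====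

-- A side: for i in L: acc.append(i)  builds  acc ++ L
theorem pv_foldl_append (L : List Int) : ∀ acc : List Int, L.foldl (fun a i => a ++ [i]) acc = acc ++ L := by
  induction L with
  | nil => simp
  | cons x t ih => intro acc; simp [List.foldl_cons, ih]

-- a fold of inserts at keys not containing j leaves getD j unchanged
theorem pv_getD_foldl_ins_not_mem {ν : Type} (L : List Int) (v : Int → ν) (j : Int) (dflt : ν)
    (hj : j ∉ L) : ∀ d : PySem.Dict Int ν,
    (L.foldl (fun d k => d.insert k (v k)) d).getD j dflt = d.getD j dflt := by
  induction L with
  | nil => intro d; rfl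
  | cons x t ih =>
    intro d
    simp only [List.foldl_cons]
    rw [ih (fun h => hj (List.mem_cons_of_mem _ h))]
    exact PySem.Dict.getD_insert_of_ne d (v x) dflt (fun h => hj (h ▸ List.mem_cons_self ..))

-- a fold of inserts over a Nodup list containing j sets getD j to v j
theorem pv_getD_foldl_ins_mem {ν : Type} (L : List Int) (v : Int → ν) (j : Int) (dflt : ν)
    (hnd : L.Nodup) (hj : j ∈ L) : ∀ d : PySem.Dict Int ν,
    (L.foldl (fun d k => d.insert k (v k)) d).getD j dflt = v j := by
  induction L with
  | nil => cases hj
  | cons x t ih =>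
    intro d
    simp only [List.foldl_cons]
    rcases List.mem_cons.mp hj with h | h
    · subst h
      rw [pv_getD_foldl_ins_not_mem t v j dflt (List.nodup_cons.mp hnd).1]
      exact PySem.Dict.getD_insert_self ..
    · exact ih (List.nodup_cons.mp hnd).2 h _

-- a fold of inserts at already-present keys keeps the key list
theorem pv_keys_foldl_ins_contained {ν : Type} (L : List Int) (v : Int → ν) :
    ∀ d : PySem.Dict Int ν, (∀ k ∈ L, d.contains k = true) →
    (L.foldl (fun d k => d.insert k (v k)) d).keys = d.keys := by
  induction L with
  | nil => intro d _; rfl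
  | cons x t ih =>
    intro d hc
    simp only [List.foldl_cons]
    have hx : d.contains x = true := hc x (List.mem_cons_self ..)
    rw [ih _ (fun k hk => by
      rw [PySem.Dict.contains_insert]
      simp [hc k (List.mem_cons_of_mem _ hk)])]
    exact PySem.Dict.keys_insert_of_contains d (v x) hx

-- keys of a fresh insert-fold from the empty dict
theorem pv_keys_foldl_ins_empty {ν : Type} (L : List Int) (hnd : L.Nodup) (v : Int → ν) :
    (L.foldl (fun d k => d.insert k (v k)) PySem.Dict.empty).keys = L := by
  have h := PySem.Dict.items_foldl_insert_fresh L (fun i => i) v PySem.Dict.empty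
    (fun a _ => PySem.Dict.contains_empty a) (by simpa using hnd)
  show (L.foldl (fun d k => d.insert k (v k)) PySem.Dict.empty).items.map (·.1) = L
  rw [h]
  simp [PySem.Dict.empty, Function.comp_def]

-- B side, sort phase: Python's tuple sort is the sort by the lexicographic key
theorem pv_sorted2_eq_sorted_lex (xs : List (Int × Int)) :
    PySem.List.sorted2 xs (fun p => p.1) (fun p => p.2)
      = PySem.List.sorted xs (fun p => (toLex p : Int ×ₗ Int)) := by
  show xs.foldl (fun acc x => PySem.List.insertBy
      (fun a b : Int × Int => decide (a.1 < b.1) || (!decide (b.1 < a.1) && decide (a.2 < b.2))) x acc) []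
    = xs.foldl (fun acc x => PySem.List.insertBy
      (fun a b : Int × Int => decide ((toLex a : Int ×ₗ Int) < toLex b)) x acc) []
  have hbef : (fun a b : Int × Int => decide (a.1 < b.1) || (!decide (b.1 < a.1) && decide (a.2 < b.2)))
      = (fun a b : Int × Int => decide ((toLex a : Int ×ₗ Int) < toLex b)) := by
    funext a b
    by_cases h1 : a.1 < b.1 <;> by_cases h2 : b.1 < a.1 <;> by_cases h3 : a.2 < b.2 <;>
      simp [h1, h2, h3, Prod.Lex.toLex_lt_toLex] <;> omega
  rw [hbef]

-- flatMap of a one-or-none block is filter-then-map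
theorem pv_flatMap_if {α : Type} (B : List Int) (f : Int → Bool) (g : Int → α) :
    B.flatMap (fun j => if f j then [g j] else []) = (B.filter f).map g := by
  induction B with
  | nil => rfl
  | cons x t ih =>
    by_cases h : f x <;> simp [List.flatMap_cons, h, ih]

-- flatMap distributes over pointwise append, up to permutation
theorem pv_perm_flatMap_append {α : Type} (B : List Int) (u v : Int → List α) :
    (B.flatMap fun j => u j ++ v j).Perm (B.flatMap u ++ B.flatMap v) := by
  induction B with
  | nil => simp
  | cons x t ih =>
    simp only [List.flatMap_cons, List.append_assoc]
    refine (ih.append_left _).append_left _ |>.trans ?_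
    have h : (v x ++ (t.flatMap u ++ t.flatMap v)).Perm (t.flatMap u ++ (v x ++ t.flatMap v)) := by
      rw [← List.append_assoc, ← List.append_assoc]
      exact (List.perm_append_comm).append_right _
    exact (h.append_left (u x)).trans (by simp)

-- the row-major and the column-major sparse coordinate lists are permutations of each other
theorem pv_perm_swap (A B : List Int) (p : Int → Int → Bool) :
    (B.flatMap fun j => ((A.filter fun i => p i j).map fun i => (j, i))).Perm
      (A.flatMap fun i => ((B.filter fun j => p i j).map fun j => (j, i))) := by
  induction A with
  | nil => simp
  | cons x t ih =>
    have hsplit : (fun j => (((x :: t).filter fun i => p i j).map fun i => (j, i)))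
        = fun j => (if p x j then [(j, x)] else []) ++ ((t.filter fun i => p i j).map fun i => (j, i)) := by
      funext j
      by_cases h : p x j <;> simp [h]
    rw [hsplit, List.flatMap_cons]
    refine (pv_perm_flatMap_append B _ _).trans ?_
    rw [pv_flatMap_if B (fun j => p x j) (fun j => (j, x))]
    exact (ih.append_left _)

-- the column-major coordinate list is strictly increasing in the lexicographic order
theorem pv_pairwise_colCoords (B : List Int) (hB : B.Pairwise (· < ·)) (inner : Int → List Int)
    (hin : ∀ j, (inner j).Pairwise (· < ·)) :
    (B.flatMap fun j => ((inner j).map fun i => (j, i))).Pairwise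
      (fun a b : Int × Int => (toLex a : Int ×ₗ Int) < toLex b) := by
  induction B with
  | nil => simp
  | cons x t ih =>
    rw [List.flatMap_cons, List.pairwise_append]
    refine ⟨?_, ih (List.pairwise_cons.mp hB).2, ?_⟩
    · rw [List.pairwise_map]
      exact (hin x).imp (fun h => by simp [Prod.Lex.toLex_lt_toLex, h])
    · intro a ha b hb
      simp only [List.mem_map] at ha
      obtain ⟨i, _, rfl⟩ := ha
      simp only [List.mem_flatMap, List.mem_map] at hb
      obtain ⟨j, hj, i', _, rfl⟩ := hb
      have : x < j := (List.pairwise_cons.mp hB).1 j hj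
      simp [Prod.Lex.toLex_lt_toLex, this]

-- a foldl over a flatMap is the nested foldl
theorem pv_foldl_flatMap {α β : Type} (B : List Int) (g : Int → List α) (f : β → α → β) :
    ∀ init : β, (B.flatMap g).foldl f init = B.foldl (fun acc j => (g j).foldl f acc) init := by
  induction B with
  | nil => intro init; rfl
  | cons x t ih => intro init; simp only [List.flatMap_cons, List.foldl_append, List.foldl_cons, ih]

-- appending rows at a fixed key: other keys unchanged
theorem pv_getD_app_ne (Lst : List Int) (j j' : Int) (hne : j' ≠ j) :
    ∀ d : PySem.Dict Int (List Int),
    (Lst.foldl (fun d i => d.modify j [] (fun l => l ++ [i])) d).getD j' [] = d.getD j' [] := by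
  induction Lst with
  | nil => intro d; rfl
  | cons x t ih =>
    intro d
    simp only [List.foldl_cons]
    rw [ih, PySem.Dict.getD_modify_of_ne d [] _ hne]

-- appending rows at a fixed key: that key accumulates the list
theorem pv_getD_app_self (Lst : List Int) (j : Int) :
    ∀ d : PySem.Dict Int (List Int),
    (Lst.foldl (fun d i => d.modify j [] (fun l => l ++ [i])) d).getD j [] = d.getD j [] ++ Lst := by
  induction Lst with
  | nil => intro d; simp
  | cons x t ih =>
    intro d
    simp only [List.foldl_cons]
    rw [ih, PySem.Dict.getD_modify_self]
    simp

-- appending rows at a present key keeps the key list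
theorem pv_keys_app (Lst : List Int) (j : Int) :
    ∀ d : PySem.Dict Int (List Int), d.contains j = true →
    (Lst.foldl (fun d i => d.modify j [] (fun l => l ++ [i])) d).keys = d.keys := by
  induction Lst with
  | nil => intro d _; rfl
  | cons x t ih =>
    intro d hc
    simp only [List.foldl_cons]
    have hk : (d.modify j [] (fun l => l ++ [x])).keys = d.keys := by
      rw [PySem.Dict.keys_modify]
      exact PySem.Dict.keys_insert_of_contains d _ hc
    rw [ih _ (by rw [PySem.Dict.contains_iff_mem_keys, hk, ← PySem.Dict.contains_iff_mem_keys]; exact hc), hk]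

-- the block-by-block scatter keeps the key list
theorem pv_keys_scatter (L : List Int) (blk : Int → List Int) :
    ∀ d : PySem.Dict Int (List Int), (∀ k ∈ L, d.contains k = true) →
    (L.foldl (fun d j => (blk j).foldl (fun d i => d.modify j [] (fun l => l ++ [i])) d) d).keys = d.keys := by
  induction L with
  | nil => intro d _; rfl
  | cons x t ih =>
    intro d hc
    simp only [List.foldl_cons]
    have hk := pv_keys_app (blk x) x d (hc x (List.mem_cons_self ..))
    rw [ih _ (fun k hk' => by
      rw [PySem.Dict.contains_iff_mem_keys, hk, ← PySem.Dict.contains_iff_mem_keys]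
      exact hc k (List.mem_cons_of_mem _ hk')), hk]

-- the scatter over blocks whose keys avoid j leaves getD j unchanged
theorem pv_getD_scatter_ne (T : List Int) (blk : Int → List Int) (j : Int) (hj : j ∉ T) :
    ∀ d : PySem.Dict Int (List Int),
    (T.foldl (fun d k => (blk k).foldl (fun d i => d.modify k [] (fun l => l ++ [i])) d) d).getD j []
      = d.getD j [] := by
  induction T with
  | nil => intro d; rfl
  | cons y s ih =>
    intro d
    simp only [List.foldl_cons]
    rw [ih (fun h => hj (List.mem_cons_of_mem _ h)),
      pv_getD_app_ne (blk y) y j (fun he => hj (he ▸ List.mem_cons_self ..))]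

-- the block-by-block scatter fills key j with exactly its block
theorem pv_getD_scatter (L : List Int) (blk : Int → List Int) (j : Int)
    (hnd : L.Nodup) (hj : j ∈ L) : ∀ d : PySem.Dict Int (List Int),
    (L.foldl (fun d j => (blk j).foldl (fun d i => d.modify j [] (fun l => l ++ [i])) d) d).getD j []
      = d.getD j [] ++ blk j := by
  induction L with
  | nil => cases hj
  | cons x t ih =>
    intro d
    simp only [List.foldl_cons]
    rcases List.mem_cons.mp hj with h | h
    · subst h
      rw [pv_getD_scatter_ne t blk j (List.nodup_cons.mp hnd).1, pv_getD_app_self]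
    · have hjx : j ≠ x := fun he => (List.nodup_cons.mp hnd).1 (he ▸ h)
      rw [ih (List.nodup_cons.mp hnd).2 h, pv_getD_app_ne (blk x) x j hjx]

-- main equivalence
theorem pv_row_eq (matrix : List (List Int)) (rows i : Int) (h0 : 0 ≤ i) (hi : i < rows)
    (hlen : rows.toNat ≤ matrix.length) :
    PySem.List.pyGetD (matrix.take rows.toNat) i [] = (PySem.List.pyGet? matrix i).getD [] := by
  obtain ⟨k, rfl⟩ := Int.eq_ofNat_of_zero_le h0
  have hk : k < rows.toNat := by omega
  have hk2 : k < matrix.length := lt_of_lt_of_le hk hlen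
  rw [PySem.List.pyGetD_natCast, PySem.List.pyGet?_natCast]
  simp [List.getD_eq_getElem?_getD, hk, hk2]

-- a flatMap of nothing is nothing
theorem pv_flatMap_nil {α β : Type} (l : List α) : l.flatMap (fun _ => ([] : List β)) = [] := by
  induction l with
  | nil => rfl
  | cons x t ih => simp [ih]

-- a flatMap only depends on the function's values on the list's members
theorem pv_flatMap_congr {α β : Type} (l : List α) (f g : α → List β)
    (h : ∀ x ∈ l, f x = g x) : l.flatMap f = l.flatMap g := by
  rw [List.flatMap_def, List.flatMap_def, List.map_congr_left h]

-- main equivalence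
theorem pv_main (matrix : List (List Int)) (rows columns : Int)
    (hpre : Pre_find_neuros_for_lambda_function matrix rows columns) :
    find_neuros_for_lambda_function matrix rows columns
      = find_neuros_for_lambda_function_alt matrix rows columns := by
  simp only [find_neuros_for_lambda_function, find_neuros_for_lambda_function_alt]
  set c : Int → Int → Bool :=
    fun i j => (PySem.List.pyGet? ((PySem.List.pyGet? matrix i).getD []) j).getD 0 == 1 with hc
  set L : List Int := PySem.List.pyRange 0 columns 1 with hL
  set R : List Int := PySem.List.pyRange 0 rows 1 with hR
  have hndL : L.Nodup := PySem.List.nodup_pyRange_one 0 columns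
  -- ===== A's side: items = L.map (fun j => (j, R.filter (c · j))) =====
  rw [show L.foldl (fun a i => a ++ [i]) ([] : List Int) = L by rw [pv_foldl_append]; rfl]
  have hd1keys : (L.foldl (fun d i => d.insert i (none : Option (List Int))) PySem.Dict.empty).keys = L :=
    pv_keys_foldl_ins_empty L hndL (fun _ => none)
  have hcont1 : ∀ k ∈ L,
      (L.foldl (fun d i => d.insert i (none : Option (List Int))) PySem.Dict.empty).contains k = true := by
    intro k hk; rw [PySem.Dict.contains_iff_mem_keys, hd1keys]; exact hk
  have hd2keys : (L.foldl (fun d j => d.insert j (some (R.foldl (fun l i => if c i j then l ++ [i] else l) [])))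
        (L.foldl (fun d i => d.insert i (none : Option (List Int))) PySem.Dict.empty)).keys = L := by
    rw [pv_keys_foldl_ins_contained L
      (fun j => some (R.foldl (fun l i => if c i j then l ++ [i] else l) [])) _ hcont1, hd1keys]
  have hAitems : (L.foldl (fun d j => d.insert j (some (R.foldl (fun l i => if c i j then l ++ [i] else l) [])))
        (L.foldl (fun d i => d.insert i (none : Option (List Int))) PySem.Dict.empty)).items
      = L.map (fun j => (j, some (R.foldl (fun l i => if c i j then l ++ [i] else l) []))) := by
    rw [PySem.Dict.items_eq_map_keys _ (by rw [hd2keys]; exact hndL) none, hd2keys]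
    refine List.map_congr_left (fun j hj => ?_)
    rw [pv_getD_foldl_ins_mem L
      (fun j => some (R.foldl (fun l i => if c i j then l ++ [i] else l) [])) j none hndL hj]
  rw [hAitems, List.map_map]
  have hAcol : ∀ j : Int, R.foldl (fun l i => if c i j then l ++ [i] else l) []
      = R.filter (fun i => c i j) := by
    intro j
    rw [PySem.List.foldl_append_if_eq_filter (fun i => c i j) R []]
    rfl
  -- ===== B's side: the enumerate comprehension is the row-major coordinate list =====
  have hcoords : ((PySem.List.enumerate (PySem.List.slice matrix none (some (max rows 0)))).flatMap fun p =>
        ((L.filter fun j => (PySem.List.pyGet? p.2 j).getD 0 == 1).map fun j => (j, p.1)))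
      = (R.flatMap fun i => ((L.filter fun j => c i j).map fun j => (j, i))) := by
    rw [PySem.List.slice_to matrix (le_max_right rows 0)]
    rw [PySem.List.enumerate_eq_map_pyRange _ ([] : List Int)]
    have hmax : (max rows 0).toNat = rows.toNat := by omega
    rw [hmax]
    by_cases hcol : columns ≤ 0
    · rw [PySem.List.pyRange_one_eq_nil hcol] at hL
      simp only [hL, List.filter_nil, List.map_nil]
      rw [pv_flatMap_nil, pv_flatMap_nil]
    · have hlen : rows.toNat ≤ matrix.length := by
        rcases hpre with h | h | ⟨h, _⟩
        · omega
        · omega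
        · omega
      have hrange : PySem.List.pyRange 0 (PySem.List.len (matrix.take rows.toNat)) 1 = R := by
        have : PySem.List.len (matrix.take rows.toNat) = (rows.toNat : Int) := by
          simp [PySem.List.len, List.length_take]
          omega
        rw [this, hR]
        by_cases hr : 0 ≤ rows
        · rw [Int.toNat_of_nonneg hr]
        · rw [PySem.List.pyRange_one_eq_nil (by omega), PySem.List.pyRange_one_eq_nil (by omega)]
      rw [List.flatMap_def, List.map_map, ← List.flatMap_def, hrange]
      refine pv_flatMap_congr R _ _ (fun i hi => ?_)
      rw [hR, PySem.List.mem_pyRange_one] at hi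
      rw [Function.comp_def]
      have hrow := pv_row_eq matrix rows i hi.1 hi.2 hlen
      simp only [hrow, hc]
  rw [hcoords]
  -- ===== B's side: sorted coords = column-major coords =====
  have hsorted : PySem.List.sorted2
        (R.flatMap fun i => ((L.filter fun j => c i j).map fun j => (j, i)))
        (fun p => p.1) (fun p => p.2)
      = (L.flatMap fun j => ((R.filter fun i => c i j).map fun i => (j, i))) := by
    rw [pv_sorted2_eq_sorted_lex]
    exact PySem.List.sorted_eq_of_perm_of_pairwise_lt _ _ _
      (pv_perm_swap R L c)
      (pv_pairwise_colCoords L (PySem.List.pairwise_lt_pyRange_one 0 columns)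
        (fun j => R.filter (fun i => c i j))
        (fun j => List.Pairwise.filter _ (PySem.List.pairwise_lt_pyRange_one 0 rows)))
  rw [hsorted]
  -- ===== B's side: scatter the column-major coords into the seeded dict =====
  have hd0keys : (L.foldl (fun d j => d.insert j ([] : List Int)) PySem.Dict.empty).keys = L :=
    pv_keys_foldl_ins_empty L hndL (fun _ => [])
  have hcont0 : ∀ k ∈ L,
      (L.foldl (fun d j => d.insert j ([] : List Int)) PySem.Dict.empty).contains k = true := by
    intro k hk; rw [PySem.Dict.contains_iff_mem_keys, hd0keys]; exact hk
  have hfold : ((L.flatMap fun j => ((R.filter fun i => c i j).map fun i => (j, i))).foldl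
        (fun d p => d.modify p.1 [] (fun l => l ++ [p.2]))
        (L.foldl (fun d j => d.insert j ([] : List Int)) PySem.Dict.empty))
      = L.foldl (fun d j => (R.filter fun i => c i j).foldl
          (fun d i => d.modify j [] (fun l => l ++ [i])) d)
        (L.foldl (fun d j => d.insert j ([] : List Int)) PySem.Dict.empty) := by
    rw [pv_foldl_flatMap]
    simp only [List.foldl_map]
  rw [hfold]
  have hBkeys : (L.foldl (fun d j => (R.filter fun i => c i j).foldl
        (fun d i => d.modify j [] (fun l => l ++ [i])) d)
        (L.foldl (fun d j => d.insert j ([] : List Int)) PySem.Dict.empty)).keys = L := by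
    rw [pv_keys_scatter L _ _ hcont0, hd0keys]
  rw [PySem.Dict.items_eq_map_keys _ (by rw [hBkeys]; exact hndL) [], hBkeys]
  refine List.map_congr_left (fun j hj => ?_)
  rw [pv_getD_scatter L _ j hndL hj,
    pv_getD_foldl_ins_mem L (fun _ => ([] : List Int)) j [] hndL hj PySem.Dict.empty]
  simp [hAcol j]

-- ===== VERDICT (by name: the statement is the Claim_ definition above) =====
theorem find_neuros_for_lambda_function_spec : Claim_equal_find_neuros_for_lambda_function := by
  intro matrix rows columns _ hpre
  exact pv_main matrix rows columns hpre
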